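-- pv_equiv track=rewrite | github.com/hevarmette/Swiss_Tournament_Management | swiss_rounds_2.py | get_visual_match_numbers
-- ===== SOURCE A (Python) =====
-- def get_visual_match_numbers(round_num, total_rounds):
--     order = [1]
--     for r in range(total_rounds, round_num, -1):
--         next_order = []
--         L = 2 ** (total_rounds - r + 1)
--         for x in order:
--             if x % 2 == 1:
--                 next_order.extend([x, L - x + 1])
--             else:
--                 next_order.extend([L - x + 1, x])
--         order = next_order
--     return order
-- ===== SOURCE B (Python) =====
-- def get_visual_match_numbers(round_num, total_rounds):
--     # Per-index computation: each output element is derived from the binary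
--     # digits of its position, instead of building the list level by level.
--     k = total_rounds - round_num
--     if k <= 0:
--         return [1]
--     result = []
--     for p in range(2 ** k):
--         val = 1
--         for t in range(1, k + 1):
--             b = (p // 2 ** (k - t)) % 2
--             if (val % 2 == 1) != (b == 0):
--                 val = 2 ** t - val + 1
--         result.append(val)
--     return result
-- ===== Notes on version B (the rewrite author's own statement) =====
-- stated objective: alternative
-- what changed: B computes each output element independently from the binary digits of its position (column-wise bit walk), instead of A's level-by-level doubling of the whole bracket list.
import Mathlib
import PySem

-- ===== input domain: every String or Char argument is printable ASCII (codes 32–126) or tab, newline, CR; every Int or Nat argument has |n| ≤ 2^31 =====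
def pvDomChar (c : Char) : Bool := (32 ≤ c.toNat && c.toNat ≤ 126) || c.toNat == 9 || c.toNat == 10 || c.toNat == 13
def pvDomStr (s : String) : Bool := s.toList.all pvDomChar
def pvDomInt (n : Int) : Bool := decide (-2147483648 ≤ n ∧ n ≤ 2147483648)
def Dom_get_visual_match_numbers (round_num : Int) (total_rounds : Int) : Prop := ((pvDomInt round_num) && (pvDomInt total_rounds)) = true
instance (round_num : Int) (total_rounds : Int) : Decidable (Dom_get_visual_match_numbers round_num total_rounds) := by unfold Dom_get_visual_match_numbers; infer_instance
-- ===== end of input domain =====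

-- B computes each bracket position independently from the binary digits of its index
-- instead of A's level-by-level doubling; alternative decomposition, same exact values.

-- ===== PORT A =====
def get_visual_match_numbers (round_num : Int) (total_rounds : Int) : List Int :=
  (PySem.List.pyRange total_rounds round_num (-1)).foldl
    (fun order r =>
      let L : Int := 2 ^ (total_rounds - r + 1).toNat
      order.foldl (fun next_order x =>
        if PySem.Int.mod x 2 == 1 then next_order ++ [x, L - x + 1]
        else next_order ++ [L - x + 1, x]) [])
    [1]

-- ===== PORT B =====
def get_visual_match_numbers_alt (round_num : Int) (total_rounds : Int) : List Int :=
  let k := total_rounds - round_num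
  if k ≤ 0 then [1]
  else
    (PySem.List.pyRange 0 (2 ^ k.toNat) 1).foldl
      (fun result p =>
        let val := (PySem.List.pyRange 1 (k + 1) 1).foldl
          (fun val t =>
            let b := PySem.Int.mod (PySem.Int.floordiv p (2 ^ (k - t).toNat)) 2
            if (PySem.Int.mod val 2 == 1) != (b == 0) then 2 ^ t.toNat - val + 1 else val) 1
        result ++ [val]) []

-- ===== PRECONDITION & SPEC =====
def Spec_get_visual_match_numbers (round_num : Int) (total_rounds : Int) (out : List Int) : Prop := out = get_visual_match_numbers_alt round_num total_rounds
instance (round_num : Int) (total_rounds : Int) (out : List Int) : Decidable (Spec_get_visual_match_numbers round_num total_rounds out) := by unfold Spec_get_visual_match_numbers; infer_instance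

-- ===== CLAIM (what is proved, stated in full; the proofs are below) =====
def Claim_equal_get_visual_match_numbers : Prop := ∀ (round_num : Int) (total_rounds : Int), Dom_get_visual_match_numbers round_num total_rounds → Spec_get_visual_match_numbers round_num total_rounds (get_visual_match_numbers round_num total_rounds)

-- ===== LEMMAS AND PROOFS =====

-- one update step of B's bit walk: level size L, bit bm, current value v
def pvUpd (L : Int) (bm : Nat) (v : Int) : Int :=
  if (PySem.Int.mod v 2 == 1) != (bm == 0) then L - v + 1 else v

-- B's per-index value after k bit steps, index m
def pvVal : Nat → Nat → Int
  | 0, _ => 1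
  | k + 1, m => pvUpd (2 ^ (k + 1)) (m % 2) (pvVal k (m / 2))

-- one level of A's doubling
def pvStep (L : Int) (x : Int) : List Int :=
  if PySem.Int.mod x 2 == 1 then [x, L - x + 1] else [L - x + 1, x]

-- A's list after k levels
def pvIter : Nat → List Int
  | 0 => [1]
  | k + 1 => (pvIter k).flatMap (pvStep (2 ^ (k + 1)))

lemma pvRange_double (n : Nat) :
    List.range (2 * n) = (List.range n).flatMap (fun m => [2 * m, 2 * m + 1]) := by
  induction n with
  | zero => simp
  | succ n ih =>
      have : 2 * (n + 1) = (2 * n + 1) + 1 := by omega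
      rw [this, List.range_succ, List.range_succ, List.range_succ, ih]
      simp

lemma pvStep_eq (L v : Int) : pvStep L v = [pvUpd L 0 v, pvUpd L 1 v] := by
  unfold pvStep pvUpd
  rw [PySem.Int.mod_eq_emod_of_pos (by norm_num)]
  by_cases h : v % 2 = 1
  · simp [h]
  · simp [h]

lemma pvFold_flat (L : Int) (l acc : List Int) :
    l.foldl (fun next_order x =>
      if PySem.Int.mod x 2 == 1 then next_order ++ [x, L - x + 1]
      else next_order ++ [L - x + 1, x]) acc = acc ++ l.flatMap (pvStep L) := by
  have h : l.foldl (fun next_order x =>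
      if PySem.Int.mod x 2 == 1 then next_order ++ [x, L - x + 1]
      else next_order ++ [L - x + 1, x]) acc
      = l.foldl (fun next_order x => next_order ++ pvStep L x) acc := by
    apply PySem.List.foldl_congr_mem
    intro a x _
    unfold pvStep
    split <;> rfl
  rw [h, PySem.List.foldl_append_eq_flatMap]

-- main bridge: A's level-k list is B's per-index values in order
lemma pvIter_eq_map (k : Nat) :
    pvIter k = (List.range (2 ^ k)).map (fun m => pvVal k m) := by
  induction k with
  | zero => simp [pvIter, pvVal]
  | succ k ih =>
      have h2 : (2 : Nat) ^ (k + 1) = 2 * 2 ^ k := by ring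
      rw [pvIter, ih, h2, pvRange_double, List.flatMap_map, List.map_flatMap]
      apply List.flatMap_congr
      intro m _
      simp only [List.map_cons, List.map_nil, pvStep_eq]
      have e1 : (2 * m) % 2 = 0 := by omega
      have e2 : (2 * m) / 2 = m := by omega
      have e3 : (2 * m + 1) % 2 = 1 := by omega
      have e4 : (2 * m + 1) / 2 = m := by omega
      simp [pvVal, e1, e2, e3, e4]

-- A's fold over the countdown range equals pvIter
lemma pvA_eq (round_num total_rounds : Int) :
    get_visual_match_numbers round_num total_rounds = pvIter (total_rounds - round_num).toNat := by
  unfold get_visual_match_numbers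
  rw [PySem.List.pyRange_neg_one, List.foldl_map]
  generalize (total_rounds - round_num).toNat = k
  induction k with
  | zero => simp [pvIter]
  | succ k ih =>
      rw [List.range_succ, List.foldl_append, ih]
      simp only [List.foldl_cons, List.foldl_nil]
      rw [pvIter]
      have he : (total_rounds - (total_rounds - (k : Int)) + 1).toNat = k + 1 := by omega
      rw [he, pvFold_flat]
      simp

-- B's inner fold computes pvVal (index given as a cast Nat)
lemma pvB_inner (k m : Nat) :
    (PySem.List.pyRange 1 ((k : Int) + 1) 1).foldl
      (fun val t =>
        let b := PySem.Int.mod (PySem.Int.floordiv (m : Int) (2 ^ ((k : Int) - t).toNat)) 2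
        if (PySem.Int.mod val 2 == 1) != (b == 0) then 2 ^ t.toNat - val + 1 else val) 1
    = pvVal k m := by
  induction k generalizing m with
  | zero =>
      rw [PySem.List.pyRange_one_eq_nil (by omega)]
      simp [pvVal]
  | succ k ih =>
      simp only [Nat.cast_add, Nat.cast_one]
      rw [PySem.List.pyRange_one_succ_right (by omega), List.foldl_append]
      have hcongr : (PySem.List.pyRange 1 ((k : Int) + 1) 1).foldl
          (fun val t =>
            let b := PySem.Int.mod (PySem.Int.floordiv (m : Int) (2 ^ ((k : Int) + 1 - t).toNat)) 2
            if (PySem.Int.mod val 2 == 1) != (b == 0) then 2 ^ t.toNat - val + 1 else val) 1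
          = (PySem.List.pyRange 1 ((k : Int) + 1) 1).foldl
          (fun val t =>
            let b := PySem.Int.mod (PySem.Int.floordiv ((m / 2 : Nat) : Int) (2 ^ ((k : Int) - t).toNat)) 2
            if (PySem.Int.mod val 2 == 1) != (b == 0) then 2 ^ t.toNat - val + 1 else val) 1 := by
        apply PySem.List.foldl_congr_mem
        intro acc t ht
        rw [PySem.List.mem_pyRange_one] at ht
        have he : ((k : Int) + 1 - t).toNat = ((k : Int) - t).toNat + 1 := by omega
        have hdiv : PySem.Int.floordiv (m : Int) (2 ^ (((k : Int) - t).toNat + 1))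
            = PySem.Int.floordiv ((m / 2 : Nat) : Int) (2 ^ ((k : Int) - t).toNat) := by
          have c1 : ((2 : Int) ^ (((k : Int) - t).toNat + 1)) = ((2 ^ (((k : Int) - t).toNat + 1) : Nat) : Int) := by push_cast; ring
          have c2 : ((2 : Int) ^ (((k : Int) - t).toNat)) = ((2 ^ (((k : Int) - t).toNat) : Nat) : Int) := by push_cast; ring
          rw [c1, c2, PySem.Int.floordiv_natCast, PySem.Int.floordiv_natCast]
          norm_num [Nat.div_div_eq_div_mul, pow_succ]
          congr 1
          omega
        simp only [he, hdiv]
      rw [hcongr, ih]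
      -- last step: t = k + 1
      simp only [List.foldl_cons, List.foldl_nil]
      have he0 : ((k : Int) + 1 - ((k : Int) + 1)).toNat = 0 := by omega
      have ht : (((k : Int) + 1)).toNat = k + 1 := by omega
      rw [he0, ht]
      have hfd : PySem.Int.floordiv (m : Int) (2 ^ (0 : Nat)) = (m : Int) := by
        simp [PySem.Int.floordiv_eq_ediv_of_pos]
      have hm : PySem.Int.mod (m : Int) 2 = ((m % 2 : Nat) : Int) := by
        exact_mod_cast PySem.Int.mod_natCast m 2
      rw [pvVal]
      unfold pvUpd
      rw [hfd, hm]
      have hcast : (2 : Int) ^ (k + 1) = 2 ^ (k + 1) := rfl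
      by_cases hp : m % 2 = 0
      · simp [hp]
      · have hp1 : m % 2 = 1 := by omega
        simp [hp1]

-- B's outer fold equals map of pvVal over the index range
lemma pvB_eq (round_num total_rounds : Int) (hk : 0 < total_rounds - round_num) :
    get_visual_match_numbers_alt round_num total_rounds
      = (List.range (2 ^ (total_rounds - round_num).toNat)).map
          (fun m => pvVal (total_rounds - round_num).toNat m) := by
  unfold get_visual_match_numbers_alt
  rw [if_neg (by omega)]
  generalize hK : (total_rounds - round_num).toNat = k
  have hkk : total_rounds - round_num = (k : Int) := by omega
  rw [hkk]
  have hpow : ((2 : Int) ^ k) = ((2 ^ k : Nat) : Int) := by push_cast; ring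
  rw [hpow, PySem.List.pyRange_zero_natCast, List.foldl_map,
      PySem.List.foldl_append_singleton_eq_map]
  simp only [List.nil_append]
  apply List.map_congr_left
  intro m _
  exact pvB_inner k m

-- ===== VERDICT (by name: the statement is the Claim_ definition above) =====
theorem get_visual_match_numbers_spec : Claim_equal_get_visual_match_numbers := by
  intro round_num total_rounds _
  unfold Spec_get_visual_match_numbers
  by_cases hk : total_rounds - round_num ≤ 0
  · rw [pvA_eq]
    have h0 : (total_rounds - round_num).toNat = 0 := by omega
    rw [h0]
    unfold get_visual_match_numbers_alt
    rw [if_pos hk]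
    rfl
  · rw [pvA_eq, pvB_eq round_num total_rounds (by omega), pvIter_eq_map]
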